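-- pv_equiv track=rewrite | github.com/HHVinh/124_code_Exercises | exercises72a.py | dem_Tu
-- ===== SOURCE A (Python) =====
-- def dem_Tu(s):
--     dem = 0
--     tachTu = s.split()
--     for i in tachTu:
--         chu = False
--         so = False
--         for a in i:
--             if a.isdigit():
--                 so = True
--             if a.isalpha():
--                 chu = True
--         if chu == True and so == True:
--             dem += 1
--     return dem
-- ===== SOURCE B (Python) =====
-- def dem_Tu(s):
--     # Single forward character scan (no split(), no per-word rescans):
--     # a small state machine over the raw characters, finalizing at each
--     # whitespace-delimited word boundary.
--     count = 0
--     hd = False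
--     ha = False
--     for c in s:
--         if c.isspace():
--             if hd and ha:
--                 count += 1
--             hd = False
--             ha = False
--         else:
--             if c.isdigit():
--                 hd = True
--             elif c.isalpha():
--                 ha = True
--     if hd and ha:
--         count += 1
--     return count
-- ===== Notes on version B (the rewrite author's own statement) =====
-- stated objective: alternative
-- what changed: Replaces split()-then-per-word-flag-loop with a single character-level state machine over the raw string that detects word boundaries itself and counts at each boundary, never materializing the word list.
import Mathlib
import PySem

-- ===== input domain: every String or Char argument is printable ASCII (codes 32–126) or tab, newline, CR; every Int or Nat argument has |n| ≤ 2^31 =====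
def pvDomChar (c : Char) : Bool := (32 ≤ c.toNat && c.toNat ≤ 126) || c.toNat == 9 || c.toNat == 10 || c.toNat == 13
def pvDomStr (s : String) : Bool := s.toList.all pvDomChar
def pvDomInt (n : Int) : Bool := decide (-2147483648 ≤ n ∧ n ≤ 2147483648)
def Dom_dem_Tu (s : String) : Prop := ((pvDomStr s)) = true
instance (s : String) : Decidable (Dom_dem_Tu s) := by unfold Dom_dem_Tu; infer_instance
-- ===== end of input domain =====

-- B replaces A's split()-then-per-word-flag-loops with a single character-level
-- state machine over the raw string (alternative decomposition; same cost).

-- ===== PORT A =====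
-- inner loop: for a in i: set so/chu flags
def demTuFlags (chu so : Bool) (cs : List Char) : Bool × Bool :=
  cs.foldl (fun (p : Bool × Bool) a =>
    let so' := if PySem.Chars.isdigit a then true else p.2
    let chu' := if PySem.Chars.isalpha a then true else p.1
    (chu', so')) (chu, so)

def dem_Tu (s : String) : Int :=
  (PySem.Str.split₀ s).foldl (fun dem i =>
    let fl := demTuFlags false false i.toList
    if fl.1 = true ∧ fl.2 = true then dem + 1 else dem) 0

-- ===== PORT B =====
-- B's loop body: one step of the character state machine (count, hd, ha)
def demTuStep (st : Int × Bool × Bool) (c : Char) : Int × Bool × Bool :=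
  if PySem.Chars.isspace c then
    ((if st.2.1 && st.2.2 then st.1 + 1 else st.1), false, false)
  else
    (st.1,
     (if PySem.Chars.isdigit c then true else st.2.1),
     (if PySem.Chars.isdigit c then st.2.2
      else if PySem.Chars.isalpha c then true else st.2.2))

def dem_Tu_alt (s : String) : Int :=
  let st := s.toList.foldl demTuStep (0, false, false)
  if st.2.1 && st.2.2 then st.1 + 1 else st.1

-- ===== PRECONDITION & SPEC =====
def Spec_dem_Tu (s : String) (out : Int) : Prop := out = dem_Tu_alt s
instance (s : String) (out : Int) : Decidable (Spec_dem_Tu s out) := by unfold Spec_dem_Tu; infer_instance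

-- ===== CLAIM (what is proved, stated in full; the proofs are below) =====
def Claim_equal_dem_Tu : Prop := ∀ (s : String), Dom_dem_Tu s → Spec_dem_Tu s (dem_Tu s)

-- ===== LEMMAS AND PROOFS =====
def demTuGood (w : List Char) : Bool :=
  w.any PySem.Chars.isdigit && w.any PySem.Chars.isalpha

theorem demTuFlags_eq (cs : List Char) (chu so : Bool) :
    demTuFlags chu so cs = (chu || cs.any PySem.Chars.isalpha, so || cs.any PySem.Chars.isdigit) := by
  induction cs generalizing chu so with
  | nil => simp [demTuFlags]
  | cons a t ih =>
    rw [show demTuFlags chu so (a :: t)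
          = demTuFlags (if PySem.Chars.isalpha a then true else chu)
                       (if PySem.Chars.isdigit a then true else so) t from rfl, ih]
    by_cases hd : PySem.Chars.isdigit a <;> by_cases ha : PySem.Chars.isalpha a <;>
      simp [hd, ha]

theorem demTu_foldl (ws : List String) (d : Int) :
    ws.foldl (fun dem i =>
      let fl := demTuFlags false false i.toList
      if fl.1 = true ∧ fl.2 = true then dem + 1 else dem) d
    = d + ((ws.map String.toList).countP demTuGood : Nat) := by
  induction ws generalizing d with
  | nil => simp
  | cons w t ih =>
    rw [List.foldl_cons, ih]
    simp only [demTuFlags_eq, Bool.false_or, List.map_cons, List.countP_cons, demTuGood]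
    by_cases h1 : w.toList.any PySem.Chars.isdigit <;>
      by_cases h2 : w.toList.any PySem.Chars.isalpha <;>
      simp [h1, h2] <;> push_cast <;> omega

theorem demTu_not_alpha_of_digit (c : Char) (h : PySem.Chars.isdigit c = true) :
    PySem.Chars.isalpha c = false := by
  simp [PySem.Chars.isdigit, Char.le_def, UInt32.le_iff_toNat_le] at h
  simp [PySem.Chars.isalpha, PySem.Chars.isupper, PySem.Chars.islower, Char.le_def,
    UInt32.le_iff_toNat_le]
  omega

theorem demTu_go_acc (cs : List Char) (cur : List Char) (acc : List (List Char)) :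
    PySem.Chars.split₀.go cs cur acc = acc.reverse ++ PySem.Chars.split₀.go cs cur [] := by
  induction cs generalizing cur acc with
  | nil =>
    simp only [PySem.Chars.split₀.go]
    split_ifs <;> simp
  | cons c rest ih =>
    simp only [PySem.Chars.split₀.go]
    split_ifs with hs he
    · rw [ih [] acc]
    · rw [ih [] (cur.reverse :: acc), ih [] [cur.reverse]]
      simp
    · rw [ih (c :: cur) acc]

theorem demTu_countP_singleton (w : List Char) :
    List.countP demTuGood [w] = if demTuGood w then 1 else 0 := by
  simp [List.countP_cons]

theorem demTu_fsm (cs : List Char) (cur : List Char) (k : Int) :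
    (let st := cs.foldl demTuStep (k, cur.any PySem.Chars.isdigit, cur.any PySem.Chars.isalpha)
     if st.2.1 && st.2.2 then st.1 + 1 else st.1)
    = k + ((PySem.Chars.split₀.go cs cur []).countP demTuGood : Nat) := by
  induction cs generalizing cur k with
  | nil =>
    simp only [List.foldl_nil, PySem.Chars.split₀.go]
    by_cases he : cur.isEmpty
    · have hc : cur = [] := by simpa [List.isEmpty_iff] using he
      simp [hc]
    · simp only [he, Bool.false_eq_true, if_false, List.reverse_cons, List.reverse_nil,
        List.nil_append]
      rw [demTu_countP_singleton]
      by_cases hg : demTuGood cur.reverse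
      · have : (cur.any PySem.Chars.isdigit && cur.any PySem.Chars.isalpha) = true := by
          simpa [demTuGood, List.any_reverse] using hg
        simp [this, hg]
      · have : (cur.any PySem.Chars.isdigit && cur.any PySem.Chars.isalpha) = false := by
          simpa [demTuGood, List.any_reverse] using hg
        simp [this, hg]
  | cons c rest ih =>
    by_cases hs : PySem.Chars.isspace c
    · have hstep : demTuStep (k, cur.any PySem.Chars.isdigit, cur.any PySem.Chars.isalpha) c
          = ((if cur.any PySem.Chars.isdigit && cur.any PySem.Chars.isalpha then k + 1 else k),
             false, false) := by
        simp [demTuStep, hs]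
      rw [List.foldl_cons, hstep]
      have hih := ih [] (if cur.any PySem.Chars.isdigit && cur.any PySem.Chars.isalpha then k + 1 else k)
      simp only [List.any_nil] at hih
      rw [hih]
      simp only [PySem.Chars.split₀.go, hs, if_pos]
      by_cases he : cur.isEmpty
      · have hc : cur = [] := by simpa [List.isEmpty_iff] using he
        simp [hc]
      · simp only [he, Bool.false_eq_true, if_false]
        rw [demTu_go_acc rest [] [cur.reverse]]
        simp only [List.reverse_cons, List.reverse_nil, List.nil_append, List.countP_append]
        rw [demTu_countP_singleton]
        by_cases hg : demTuGood cur.reverse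
        · have hb : (cur.any PySem.Chars.isdigit && cur.any PySem.Chars.isalpha) = true := by
            simpa [demTuGood, List.any_reverse] using hg
          simp only [hb, if_true, hg]
          push_cast
          ring
        · have hb : (cur.any PySem.Chars.isdigit && cur.any PySem.Chars.isalpha) = false := by
            simpa [demTuGood, List.any_reverse] using hg
          simp only [hb, Bool.false_eq_true, if_false, hg]
          push_cast
          ring
    · have hstep : demTuStep (k, cur.any PySem.Chars.isdigit, cur.any PySem.Chars.isalpha) c
          = (k, (c :: cur).any PySem.Chars.isdigit, (c :: cur).any PySem.Chars.isalpha) := by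
        simp only [demTuStep, hs, if_false, List.any_cons]
        by_cases hd : PySem.Chars.isdigit c
        · have ha := demTu_not_alpha_of_digit c hd
          simp [hd, ha]
        · by_cases ha : PySem.Chars.isalpha c <;> simp [hd, ha]
      rw [List.foldl_cons, hstep, ih (c :: cur) k]
      simp only [PySem.Chars.split₀.go, hs]
      simp

-- ===== VERDICT (by name: the statement is the Claim_ definition above) =====
theorem dem_Tu_spec : Claim_equal_dem_Tu := by
  intro s _
  unfold Spec_dem_Tu dem_Tu dem_Tu_alt
  rw [demTu_foldl]
  have h := demTu_fsm s.toList [] 0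
  simp only [List.any_nil] at h
  rw [h]
  rw [PySem.Str.split₀_map_toList]
  simp [PySem.Chars.split₀]
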